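-- pv_equiv track=rewrite | github.com/Crown-Commercial-Service/digitalmarketplace-supplier-frontend | app/main/helpers/frameworks.py | get_frameworks_closed_and_open_for_applications
-- ===== SOURCE A (Python) =====
-- from itertools import chain, islice, groupby
--
-- def get_frameworks_closed_and_open_for_applications(frameworks):
--     # This will find one framework iteration per framework-family, open > coming > closed
--     def status_priority(status):
--         if status == "open":
--             return 0
--         elif status == "coming":
--             return 1
--         else:
--             return 2
--
--     return tuple(chain.from_iterable(
--         islice(grp, 1)          # take the first framework
--         for _, grp in groupby(  # from each framework_family
--             sorted(             # listed in priority order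
--                 (fw for fw in frameworks),
--                 key=lambda fw_sort: (fw_sort["framework"], status_priority(fw_sort["status"])),
--             ),
--             key=lambda fw_groupby: fw_groupby["framework"],
--         )
--     ))
-- ===== SOURCE B (Python) =====
-- def get_frameworks_closed_and_open_for_applications(frameworks):
--     # One pass: keep, per framework family, the record with the lowest status
--     # priority seen so far (strict '<' so the first of equal priority wins),
--     # then emit families in sorted-by-name order.
--     def status_priority(status):
--         if status == "open":
--             return 0
--         elif status == "coming":
--             return 1
--         else:
--             return 2
--
--     best = {}
--     for fw in frameworks:
--         family = fw["framework"]
--         current = best.get(family)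
--         if current is None or status_priority(fw["status"]) < status_priority(current["status"]):
--             best[family] = fw
--     return tuple(best[family] for family in sorted(best))
-- ===== Notes on version B (the rewrite author's own statement) =====
-- stated objective: alternative
-- what changed: Replaces sort-whole-list-by-(family,priority)-then-groupby-take-first with a single pass maintaining a per-family best record in a dict (strict '<' keeps the first of equal priority), followed by emitting families in sorted-key order.
import Mathlib
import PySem

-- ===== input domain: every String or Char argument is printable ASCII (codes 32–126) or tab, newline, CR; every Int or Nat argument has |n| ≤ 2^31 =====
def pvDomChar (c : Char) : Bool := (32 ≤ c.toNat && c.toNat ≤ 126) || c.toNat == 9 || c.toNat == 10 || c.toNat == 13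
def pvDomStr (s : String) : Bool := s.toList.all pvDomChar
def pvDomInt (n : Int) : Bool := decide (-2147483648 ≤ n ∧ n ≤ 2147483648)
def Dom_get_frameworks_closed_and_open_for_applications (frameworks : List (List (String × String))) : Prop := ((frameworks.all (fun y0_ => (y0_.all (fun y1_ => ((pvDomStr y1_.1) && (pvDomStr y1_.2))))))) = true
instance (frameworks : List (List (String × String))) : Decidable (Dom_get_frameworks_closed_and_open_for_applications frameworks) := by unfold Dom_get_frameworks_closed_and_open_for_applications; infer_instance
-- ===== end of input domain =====

-- B replaces sort-by-(family,priority)+groupby with one dict-building pass and a sort of the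
-- family names; same return value (alternative decomposition, no speed claim).

-- ===== PORT A =====
-- status_priority (shared text of both Pythons)
def pvStatusPriority (s : String) : Int := if s = "open" then 0 else if s = "coming" then 1 else 2
-- fw["framework"] / fw["status"]: KeyError (missing key) is excluded by Pre_; inside Pre_ the
-- default "" is never used.
def pvFam (fw : List (String × String)) : String := (PySem.Dict.mk fw).getD "framework" ""
def pvPrio (fw : List (String × String)) : Int := pvStatusPriority ((PySem.Dict.mk fw).getD "status" "")
-- groupby(…, key=fam) followed by islice(grp, 1) and chain.from_iterable: emit the first
-- element of each maximal run of equal fam (cur = fam of the previous element's run).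
def pvTakeFirsts : Option String → List (List (String × String)) → List (List (String × String))
  | _, [] => []
  | cur, x :: xs => if some (pvFam x) = cur then pvTakeFirsts cur xs else x :: pvTakeFirsts (some (pvFam x)) xs

def get_frameworks_closed_and_open_for_applications (frameworks : List (List (String × String))) : List (List (String × String)) :=
  pvTakeFirsts none (PySem.List.sorted2 frameworks pvFam pvPrio)

-- ===== PORT B =====
-- body of B's for-loop: keep the first record of minimal priority per family
def pvBestStep (d : PySem.Dict String (List (String × String))) (fw : List (String × String)) : PySem.Dict String (List (String × String)) :=
  match d.get? (pvFam fw) with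
  | none => d.insert (pvFam fw) fw
  | some cur => if pvPrio fw < pvPrio cur then d.insert (pvFam fw) fw else d

def get_frameworks_closed_and_open_for_applications_alt (frameworks : List (List (String × String))) : List (List (String × String)) :=
  let best := frameworks.foldl pvBestStep PySem.Dict.empty
  (PySem.List.sorted best.keys (fun k => k) false).map (fun k => best.getD k [])

-- ===== PRECONDITION & SPEC =====
-- Pre_: both Pythons do fw["framework"] and fw["status"] on every record; a missing key raises KeyError.
def Pre_get_frameworks_closed_and_open_for_applications (frameworks : List (List (String × String))) : Prop :=
  ∀ fw ∈ frameworks, (PySem.Dict.mk fw).contains "framework" = true ∧ (PySem.Dict.mk fw).contains "status" = true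
instance (frameworks : List (List (String × String))) : Decidable (Pre_get_frameworks_closed_and_open_for_applications frameworks) := by unfold Pre_get_frameworks_closed_and_open_for_applications; infer_instance
def pvWitness_get_frameworks_closed_and_open_for_applications : (List (List (String × String))) :=
  [[("framework", "g-cloud"), ("status", "open")], [("framework", "g-cloud"), ("status", "coming")], [("framework", "dos"), ("status", "closed")]]

def Spec_get_frameworks_closed_and_open_for_applications (frameworks : List (List (String × String))) (out : List (List (String × String))) : Prop := out = get_frameworks_closed_and_open_for_applications_alt frameworks
instance (frameworks : List (List (String × String))) (out : List (List (String × String))) : Decidable (Spec_get_frameworks_closed_and_open_for_applications frameworks out) := by unfold Spec_get_frameworks_closed_and_open_for_applications; infer_instance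

-- ===== CLAIM (what is proved, stated in full; the proofs are below) =====
def Claim_equal_get_frameworks_closed_and_open_for_applications : Prop := ∀ (frameworks : List (List (String × String))), Dom_get_frameworks_closed_and_open_for_applications frameworks → Pre_get_frameworks_closed_and_open_for_applications frameworks → Spec_get_frameworks_closed_and_open_for_applications frameworks (get_frameworks_closed_and_open_for_applications frameworks)

-- ===== LEMMAS AND PROOFS =====

-- the comparison functions appearing in the two ports
def pvLex (a b : List (String × String)) : Bool :=
  decide (pvFam a < pvFam b) || (!decide (pvFam b < pvFam a) && decide (pvPrio a < pvPrio b))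
def pvLtPrio (a b : List (String × String)) : Bool := decide (pvPrio a < pvPrio b)
-- proof-side views of the two sides
def pvFams (l : List (List (String × String))) : List String :=
  PySem.List.sorted (PySem.Set.ofList (l.map pvFam)) (fun k => k) false
def pvBlock (f : String) (l : List (List (String × String))) : List (List (String × String)) :=
  PySem.List.sorted (l.filter (fun y => pvFam y == f)) pvPrio false
def pvMin? (ys : List (List (String × String))) : Option (List (String × String)) :=
  ys.foldl (fun acc y => match acc with
    | none => some y
    | some b => if pvPrio y < pvPrio b then some y else some b) none

lemma pvSorted2_unfold (xs : List (List (String × String))) :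
    PySem.List.sorted2 xs pvFam pvPrio false = xs.foldl (fun acc x => PySem.List.insertBy pvLex x acc) [] := by
  rfl

lemma pvSorted_append_singleton {α κ : Type} [LinearOrder κ] (xs : List α) (v : α) (key : α → κ) :
    PySem.List.sorted (xs ++ [v]) key false
      = PySem.List.insertBy (fun a b => decide (key a < key b)) v (PySem.List.sorted xs key false) := by
  rw [PySem.List.sorted_eq_foldl_insertBy, PySem.List.sorted_eq_foldl_insertBy, List.foldl_append]
  rfl

lemma pvInsertBy_all_true {α : Type} {b : α → α → Bool} {x : α} {L : List α}
    (h : ∀ y ∈ L, b x y = true) : PySem.List.insertBy b x L = x :: L := by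
  cases L with
  | nil => rfl
  | cons y ys => simp [PySem.List.insertBy, h y (by simp)]

lemma pvInsertBy_skip {α : Type} {b : α → α → Bool} {x : α} {L R : List α}
    (h : ∀ y ∈ L, b x y = false) :
    PySem.List.insertBy b x (L ++ R) = L ++ PySem.List.insertBy b x R := by
  induction L with
  | nil => rfl
  | cons y ys ih =>
      simp only [List.cons_append, PySem.List.insertBy, h y (by simp)]
      simp [ih (fun z hz => h z (by simp [hz]))]

lemma pvInsertBy_congr_append {x : List (String × String)} {L R : List (List (String × String))}
    (hL : ∀ y ∈ L, pvLex x y = pvLtPrio x y) (hR : ∀ y ∈ R, pvLex x y = true) :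
    PySem.List.insertBy pvLex x (L ++ R) = PySem.List.insertBy pvLtPrio x L ++ R := by
  induction L with
  | nil =>
      simp only [List.nil_append]
      rw [pvInsertBy_all_true hR]
      rfl
  | cons y ys ih =>
      simp only [List.cons_append, PySem.List.insertBy, hL y (by simp)]
      by_cases hp : pvPrio x < pvPrio y
      · simp [pvLtPrio, hp]
      · have : pvLtPrio x y = false := by simp [pvLtPrio, hp]
        simp only [this, if_false, Bool.false_eq_true]
        rw [ih (fun z hz => hL z (by simp [hz]))]
        simp [PySem.List.insertBy, this]

-- inserting one element into a block decomposition
lemma pvInsert_blocks (gs : List String) (B : String → List (List (String × String)))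
    (x : List (String × String))
    (hp : gs.Pairwise (· < ·))
    (hf : ∀ g ∈ gs, ∀ y ∈ B g, pvFam y = g)
    (h3 : pvFam x ∉ gs → B (pvFam x) = []) :
    PySem.List.insertBy pvLex x (gs.flatMap B)
      = (if pvFam x ∈ gs then gs else PySem.List.insertBy (fun a b => decide (a < b)) (pvFam x) gs).flatMap
          (fun g => if g = pvFam x then PySem.List.insertBy pvLtPrio x (B g) else B g) := by
  induction gs with
  | nil =>
      have hB : B (pvFam x) = [] := h3 (by simp)
      simp [PySem.List.insertBy, hB]
  | cons g gs ih =>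
      have hp' : gs.Pairwise (· < ·) := hp.tail
      have hgl : ∀ g' ∈ gs, g < g' := fun g' hg' => (List.pairwise_cons.mp hp).1 g' hg'
      rcases lt_trichotomy (pvFam x) g with h1 | h1 | h1
      · -- new family, smaller than every listed one
        have hnm : pvFam x ∉ g :: gs := by
          intro hmem
          rcases List.mem_cons.mp hmem with rfl | hmem
          · exact lt_irrefl _ h1
          · exact lt_irrefl _ (h1.trans (hgl _ hmem))
        have hB : B (pvFam x) = [] := h3 hnm
        have hall : ∀ y ∈ (g :: gs).flatMap B, pvLex x y = true := by
          intro y hy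
          rcases List.mem_flatMap.mp hy with ⟨g', hg', hyB⟩
          have hfy : pvFam y = g' := hf g' hg' y hyB
          have d : decide (pvFam x < g') = true := decide_eq_true (by
            rcases List.mem_cons.mp hg' with rfl | hg'
            · exact h1
            · exact h1.trans (hgl _ hg'))
          unfold pvLex
          rw [hfy, d]
          rfl
        rw [pvInsertBy_all_true hall]
        have hif : (if pvFam x ∈ g :: gs then g :: gs
            else PySem.List.insertBy (fun a b => decide (a < b)) (pvFam x) (g :: gs))
            = pvFam x :: g :: gs := by
          simp [hnm, PySem.List.insertBy, h1]
        rw [hif]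
        have hg : (if g = pvFam x then PySem.List.insertBy pvLtPrio x (B g) else B g) = B g :=
          if_neg (fun h => hnm (List.mem_cons.mpr (Or.inl h.symm)))
        have hrest' : List.flatMap (fun g' => if g' = pvFam x then PySem.List.insertBy pvLtPrio x (B g') else B g') gs = List.flatMap B gs :=
          List.flatMap_congr (fun g' hg' => if_neg (fun (h : g' = pvFam x) => hnm (List.mem_cons.mpr (Or.inr (h ▸ hg')))))
        simp only [List.flatMap_cons]
        simp [hB, PySem.List.insertBy, hg, hrest']
      · -- x's family is the head family
        subst h1
        have hL : ∀ y ∈ B (pvFam x), pvLex x y = pvLtPrio x y := by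
          intro y hy
          have hfy : pvFam y = pvFam x := hf _ (by simp) y hy
          have d : decide (pvFam x < pvFam x) = false := decide_eq_false (lt_irrefl _)
          unfold pvLex pvLtPrio
          rw [hfy, d]
          rfl
        have hR : ∀ y ∈ gs.flatMap B, pvLex x y = true := by
          intro y hy
          rcases List.mem_flatMap.mp hy with ⟨g', hg', hyB⟩
          have hfy : pvFam y = g' := hf g' (by simp [hg']) y hyB
          simp [pvLex, hfy, hgl g' hg']
        simp only [List.flatMap_cons]
        rw [pvInsertBy_congr_append hL hR]
        have hmem : pvFam x ∈ pvFam x :: gs := by simp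
        rw [if_pos hmem]
        simp only [List.flatMap_cons, if_pos rfl]
        congr 1
        refine (List.flatMap_congr ?_).symm
        intro g' hg'
        have : g' ≠ pvFam x := fun h => lt_irrefl _ (h ▸ hgl g' hg')
        simp [this]
      · -- head family is smaller: skip its block
        have hne : g ≠ pvFam x := fun h => lt_irrefl _ (h ▸ h1)
        have hskip : ∀ y ∈ B g, pvLex x y = false := by
          intro y hy
          have hfy : pvFam y = g := hf g (by simp) y hy
          have d1 : decide (pvFam x < g) = false := decide_eq_false (not_lt_of_gt h1)
          have d2 : decide (g < pvFam x) = true := decide_eq_true h1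
          unfold pvLex
          rw [hfy, d1, d2]
          rfl
        simp only [List.flatMap_cons]
        rw [pvInsertBy_skip hskip]
        rw [ih hp' (fun g' hg' => hf g' (by simp [hg'])) (fun hnm => h3 (fun hmem => (List.mem_cons.mp hmem).elim (fun he => hne he.symm) hnm))]
        by_cases hm : pvFam x ∈ gs
        · rw [if_pos hm]
          rw [if_pos (show pvFam x ∈ g :: gs from by simp [hm])]
          simp [hne]
        · rw [if_neg hm]
          rw [if_neg (show pvFam x ∉ g :: gs from by simp [Ne.symm hne, hm])]
          have hins : PySem.List.insertBy (fun a b => decide (a < b)) (pvFam x) (g :: gs)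
              = g :: PySem.List.insertBy (fun a b => decide (a < b)) (pvFam x) gs := by
            have d1 : decide (pvFam x < g) = false := decide_eq_false (not_lt_of_gt h1)
            simp only [PySem.List.insertBy, d1, Bool.false_eq_true, if_false]
          rw [hins]
          simp [hne]

-- the sorted2 list is the concatenation, over sorted distinct families, of the per-family stable sorts
lemma pvSorted2_blocks (l : List (List (String × String))) :
    PySem.List.sorted2 l pvFam pvPrio = (pvFams l).flatMap (fun f => pvBlock f l) := by
  induction l using List.reverseRecOn with
  | nil => rfl
  | append_singleton l x ih =>
      have hstep : PySem.List.sorted2 (l ++ [x]) pvFam pvPrio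
          = PySem.List.insertBy pvLex x (PySem.List.sorted2 l pvFam pvPrio) := by
        rw [pvSorted2_unfold, pvSorted2_unfold, List.foldl_append]
        rfl
      have hp : (pvFams l).Pairwise (· < ·) := PySem.List.sorted_ofList_pairwise_lt _
      have hf : ∀ g ∈ pvFams l, ∀ y ∈ pvBlock g l, pvFam y = g := by
        intro g _ y hy
        have hy' : y ∈ l.filter (fun y => pvFam y == g) := (PySem.List.mem_sorted _ _ _ _).mp hy
        exact beq_iff_eq.mp (List.mem_filter.mp hy').2
      have h3 : pvFam x ∉ pvFams l → pvBlock (pvFam x) l = [] := by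
        intro hnm
        have hnm' : pvFam x ∉ l.map pvFam := by
          intro hmem
          exact hnm ((PySem.List.mem_sorted _ _ _ _).mpr ((PySem.Set.mem_ofList _ _).mpr hmem))
        have hfil : l.filter (fun y => pvFam y == pvFam x) = [] := by
          rw [List.filter_eq_nil_iff]
          intro y hy hbeq
          exact hnm' (List.mem_map.mpr ⟨y, hy, beq_iff_eq.mp hbeq⟩)
        unfold pvBlock
        rw [hfil]
        rfl
      have hblocks : ∀ f, pvBlock f (l ++ [x])
          = (if f = pvFam x then PySem.List.insertBy pvLtPrio x (pvBlock f l) else pvBlock f l) := by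
        intro f
        unfold pvBlock
        rw [List.filter_append]
        by_cases hfx : f = pvFam x
        · have hone : [x].filter (fun y => pvFam y == f) = [x] := by simp [hfx]
          rw [hone, if_pos hfx]
          exact pvSorted_append_singleton _ _ _
        · have : [x].filter (fun y => pvFam y == f) = [] := by
            simp [beq_iff_eq]
            exact fun h => hfx h.symm
          rw [this, if_neg hfx, List.append_nil]
      have hfams : pvFams (l ++ [x])
          = (if pvFam x ∈ pvFams l then pvFams l
             else PySem.List.insertBy (fun a b => decide (a < b)) (pvFam x) (pvFams l)) := by
        unfold pvFams
        have hmap : (l ++ [x]).map pvFam = l.map pvFam ++ [pvFam x] := by simp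
        rw [hmap]
        have hof : PySem.Set.ofList (l.map pvFam ++ [pvFam x])
            = PySem.Set.add (PySem.Set.ofList (l.map pvFam)) (pvFam x) := by
          rw [PySem.Set.ofList_eq_foldl, PySem.Set.ofList_eq_foldl, List.foldl_append]
          rfl
        rw [hof, PySem.Set.add_eq_ite]
        by_cases hm : pvFam x ∈ PySem.Set.ofList (l.map pvFam)
        · rw [if_pos hm, if_pos ((PySem.List.mem_sorted _ _ _ _).mpr hm)]
        · rw [if_neg hm, if_neg (fun h => hm ((PySem.List.mem_sorted _ _ _ _).mp h))]
          exact pvSorted_append_singleton _ _ _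
      rw [hstep, ih, pvInsert_blocks _ _ _ hp hf h3, hfams]
      exact List.flatMap_congr (fun f _ => (hblocks f).symm)

lemma pvTakeFirsts_skip {g : String} {t rest : List (List (String × String))}
    (h : ∀ y ∈ t, pvFam y = g) :
    pvTakeFirsts (some g) (t ++ rest) = pvTakeFirsts (some g) rest := by
  induction t with
  | nil => rfl
  | cons y t ih =>
      have hy : pvFam y = g := h y (by simp)
      simp only [List.cons_append, pvTakeFirsts, hy]
      exact ih (fun z hz => h z (by simp [hz]))

lemma pvTakeFirsts_blocks (gs : List String) (B : String → List (List (String × String)))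
    (cur : Option String)
    (hp : gs.Pairwise (· < ·))
    (hf : ∀ g ∈ gs, ∀ y ∈ B g, pvFam y = g)
    (hne : ∀ g ∈ gs, B g ≠ [])
    (hcur : ∀ g ∈ gs, cur ≠ some g) :
    pvTakeFirsts cur (gs.flatMap B) = gs.map (fun g => (B g).headD []) := by
  induction gs generalizing cur with
  | nil => rfl
  | cons g gs ih =>
      cases hBg : B g with
      | nil => exact absurd hBg (hne g (by simp))
      | cons h t =>
          have hfh : pvFam h = g := hf g (by simp) h (by rw [hBg]; simp)
          have hcg : ¬ (some (pvFam h) = cur) := by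
            rw [hfh]
            exact fun he => hcur g (by simp) he.symm
          simp only [List.flatMap_cons, hBg, List.cons_append, pvTakeFirsts, if_neg hcg]
          rw [hfh]
          rw [pvTakeFirsts_skip (fun z hz => hf g (by simp) z (by rw [hBg]; simp [hz]))]
          have hgnot : ∀ g' ∈ gs, (some g : Option String) ≠ some g' := by
            intro g' hg'
            have : g < g' := (List.pairwise_cons.mp hp).1 g' hg'
            exact fun he => lt_irrefl g' (Option.some.inj he ▸ this)
          rw [ih (some g) hp.tail (fun g' hg' => hf g' (by simp [hg'])) (fun g' hg' => hne g' (by simp [hg'])) hgnot]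
          simp [hBg]

lemma pvHead_sorted (ys : List (List (String × String))) :
    (PySem.List.sorted ys pvPrio false).head? = pvMin? ys := by
  induction ys using List.reverseRecOn with
  | nil => rfl
  | append_singleton ys y ih =>
      rw [pvSorted_append_singleton ys y pvPrio]
      have hmin : pvMin? (ys ++ [y]) = (match pvMin? ys with
          | none => some y
          | some b => if pvPrio y < pvPrio b then some y else some b) := by
        unfold pvMin?
        rw [List.foldl_append]
        rfl
      rw [hmin]
      cases hs : PySem.List.sorted ys pvPrio false with
      | nil =>
          rw [hs] at ih
          simp only [← ih]
          rfl
      | cons s ss =>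
          rw [hs] at ih
          simp only [← ih]
          by_cases hlt : pvPrio y < pvPrio s
          · simp [PySem.List.insertBy, hlt]
          · simp [PySem.List.insertBy, hlt]

lemma pvKeys_foldl (l : List (List (String × String))) (d : PySem.Dict String (List (String × String))) :
    (l.foldl pvBestStep d).keys = l.foldl (fun s y => PySem.Set.add s (pvFam y)) d.keys := by
  induction l generalizing d with
  | nil => rfl
  | cons fw l ih =>
      simp only [List.foldl_cons]
      rw [ih]
      congr 1
      cases hg : d.get? (pvFam fw) with
      | none =>
          have hc : d.contains (pvFam fw) = false := by
            rw [PySem.Dict.contains_eq_isSome_get?, hg]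
            rfl
          have hnm : pvFam fw ∉ d.keys := fun hm =>
            by simp [(PySem.Dict.contains_iff_mem_keys d (pvFam fw)).mpr hm] at hc
          simp only [pvBestStep, hg]
          rw [PySem.Dict.keys_insert_of_not_contains _ _ hc, PySem.Set.add_of_not_mem hnm]
      | some cur =>
          have hc : d.contains (pvFam fw) = true := by
            rw [PySem.Dict.contains_eq_isSome_get?, hg]
            rfl
          have hm : pvFam fw ∈ d.keys := (PySem.Dict.contains_iff_mem_keys d (pvFam fw)).mp hc
          simp only [pvBestStep, hg]
          by_cases hlt : pvPrio fw < pvPrio cur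
          · rw [if_pos hlt, PySem.Dict.keys_insert_of_contains _ _ hc, PySem.Set.add_of_mem hm]
          · rw [if_neg hlt, PySem.Set.add_of_mem hm]

lemma pvGet?_foldl (l : List (List (String × String))) (d : PySem.Dict String (List (String × String))) (f : String) :
    (l.foldl pvBestStep d).get? f
      = (l.filter (fun y => pvFam y == f)).foldl (fun acc y => match acc with
          | none => some y
          | some b => if pvPrio y < pvPrio b then some y else some b) (d.get? f) := by
  induction l generalizing d with
  | nil => rfl
  | cons fw l ih =>
      simp only [List.foldl_cons, List.filter_cons]
      by_cases hff : pvFam fw = f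
      · have hbeq : (pvFam fw == f) = true := beq_iff_eq.mpr hff
        rw [hbeq]
        simp only [if_pos rfl, List.foldl_cons]
        rw [ih]
        have hinit : (pvBestStep d fw).get? f = (match d.get? f with
            | none => some fw
            | some b => if pvPrio fw < pvPrio b then some fw else some b) := by
          cases hg : d.get? f with
          | none =>
              simp only [pvBestStep, hff, hg]
              rw [PySem.Dict.get?_insert_self]
          | some cur =>
              simp only [pvBestStep, hff, hg]
              by_cases hlt : pvPrio fw < pvPrio cur
              · rw [if_pos hlt, if_pos hlt, PySem.Dict.get?_insert_self]
              · rw [if_neg hlt, if_neg hlt]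
                exact hg
        rw [hinit]
        rfl
      · have hbeq : (pvFam fw == f) = false := by simp [hff]
        rw [hbeq]
        simp only [Bool.false_eq_true, if_false]
        rw [ih]
        congr 1
        cases hg : d.get? (pvFam fw) with
        | none =>
            simp only [pvBestStep, hg]
            rw [PySem.Dict.get?_insert_of_ne _ _ (fun h => hff h.symm)]
        | some cur =>
            simp only [pvBestStep, hg]
            by_cases hlt : pvPrio fw < pvPrio cur
            · rw [if_pos hlt, PySem.Dict.get?_insert_of_ne _ _ (fun h => hff h.symm)]
            · rw [if_neg hlt]

-- ===== VERDICT (by name: the statement is the Claim_ definition above) =====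
theorem get_frameworks_closed_and_open_for_applications_spec : Claim_equal_get_frameworks_closed_and_open_for_applications := by
  intro frameworks _ _
  show get_frameworks_closed_and_open_for_applications frameworks
      = get_frameworks_closed_and_open_for_applications_alt frameworks
  have hkeys : (frameworks.foldl pvBestStep PySem.Dict.empty).keys
      = PySem.Set.ofList (frameworks.map pvFam) := by
    rw [pvKeys_foldl, PySem.Set.ofList_eq_foldl, List.foldl_map]
    rfl
  have hfuns : ∀ g : String, (pvBlock g frameworks).headD ([] : List (String × String))
      = (frameworks.foldl pvBestStep PySem.Dict.empty).getD g [] := by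
    intro g
    unfold pvBlock
    rw [List.headD_eq_head?_getD, pvHead_sorted, PySem.Dict.getD_eq_get?_getD, pvGet?_foldl]
    rfl
  have hp : (pvFams frameworks).Pairwise (· < ·) := PySem.List.sorted_ofList_pairwise_lt _
  have hf : ∀ g ∈ pvFams frameworks, ∀ y ∈ pvBlock g frameworks, pvFam y = g := by
    intro g _ y hy
    have hy' : y ∈ frameworks.filter (fun y => pvFam y == g) := (PySem.List.mem_sorted _ _ _ _).mp hy
    exact beq_iff_eq.mp (List.mem_filter.mp hy').2
  have hne : ∀ g ∈ pvFams frameworks, pvBlock g frameworks ≠ [] := by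
    intro g hg hnil
    have hfil : frameworks.filter (fun y => pvFam y == g) = [] :=
      (PySem.List.sorted_eq_nil_iff _ _ _).mp hnil
    have hg' : g ∈ frameworks.map pvFam :=
      (PySem.Set.mem_ofList _ _).mp ((PySem.List.mem_sorted _ _ _ _).mp hg)
    rcases List.mem_map.mp hg' with ⟨y, hy, hyg⟩
    have hmem : y ∈ frameworks.filter (fun y => pvFam y == g) :=
      List.mem_filter.mpr ⟨hy, beq_iff_eq.mpr hyg⟩
    rw [hfil] at hmem
    exact absurd hmem (List.not_mem_nil)
  have hcur : ∀ g ∈ pvFams frameworks, (none : Option String) ≠ some g :=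
    fun g _ h => by simp at h
  unfold get_frameworks_closed_and_open_for_applications
    get_frameworks_closed_and_open_for_applications_alt
  rw [pvSorted2_blocks, pvTakeFirsts_blocks _ _ none hp hf hne hcur]
  show (pvFams frameworks).map (fun g => (pvBlock g frameworks).headD [])
      = (PySem.List.sorted (frameworks.foldl pvBestStep PySem.Dict.empty).keys (fun k => k) false).map
          (fun k => (frameworks.foldl pvBestStep PySem.Dict.empty).getD k [])
  rw [hkeys]
  exact List.map_congr_left (fun g _ => hfuns g)
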